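-- pv_equiv track=rewrite | github.com/cmxrenato/estagio_ribeirao | desafioTEC/questao-1-fibo.py | eh_fibonacci
-- ===== SOURCE A (Python) =====
-- def eh_fibonacci(a):
--     fibo = [0, 1]
--
--     # Gerando a sequência Fibonacci até ter pelo menos 300 números
--     while len(fibo) < 300:
--         prox_num = fibo[-1] + fibo[-2]
--         fibo.append(prox_num)
--
--     # Verificando se o número de entrada 'a' está na lista 'fibo'
--     if a in fibo:
--         return "O número pertence à sequência Fibonacci."
--     else:
--         return "O número não pertence à sequência Fibonacci."
-- ===== SOURCE B (Python) =====
-- def eh_fibonacci(a):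
--     # Binary search over the index range 0..299 of a monotone sequence, computing
--     # F(k) directly with fast doubling instead of generating the whole sequence.
--     def fib_pair(n):
--         # (F(n), F(n+1)) by fast doubling
--         if n == 0:
--             return (0, 1)
--         p, q = fib_pair(n >> 1)
--         c = p * (2 * q - p)
--         d = p * p + q * q
--         if n & 1:
--             return (d, c + d)
--         return (c, d)
--
--     lo, hi = 0, 299
--     while lo < hi:
--         mid = (lo + hi) // 2
--         if fib_pair(mid)[0] < a:
--             lo = mid + 1
--         else:
--             hi = mid
--     if fib_pair(lo)[0] == a:
--         return "O número pertence à sequência Fibonacci."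
--     return "O número não pertence à sequência Fibonacci."
-- ===== Notes on version B (the rewrite author's own statement) =====
-- stated objective: alternative
-- what changed: Replaces A's generate-all-300-terms-then-linear-membership-scan by a binary search over the index range 0..299 of the monotone Fibonacci sequence, computing each probed F(k) directly with fast doubling; no list is built and no linear scan occurs.
import Mathlib
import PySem

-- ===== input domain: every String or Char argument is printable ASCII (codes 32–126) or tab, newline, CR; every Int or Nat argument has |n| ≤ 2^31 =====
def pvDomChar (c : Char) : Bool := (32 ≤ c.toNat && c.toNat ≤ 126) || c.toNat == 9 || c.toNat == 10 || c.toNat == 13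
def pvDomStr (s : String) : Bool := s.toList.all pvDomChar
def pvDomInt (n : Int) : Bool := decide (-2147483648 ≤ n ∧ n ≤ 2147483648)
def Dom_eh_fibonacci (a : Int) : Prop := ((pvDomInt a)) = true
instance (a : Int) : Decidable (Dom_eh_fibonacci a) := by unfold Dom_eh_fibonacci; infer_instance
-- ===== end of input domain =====

-- B replaces A's build-300-element-list-then-linear-scan by a binary search over the
-- index range 0..299 of the monotone Fibonacci sequence, computing each probed F(k)
-- directly with fast doubling (objective: alternative algorithm).

-- ===== PORT A =====
-- the while loop: while len(fibo) < 300: fibo.append(fibo[-1] + fibo[-2])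
-- (fibo always has ≥ 2 elements, so the negative indexings never raise; .getD 0 is unreachable)
def ehFibLoopA (fibo : List Int) : List Int :=
  if fibo.length < 300 then
    ehFibLoopA (fibo ++ [(PySem.List.pyGet? fibo (-1)).getD 0 + (PySem.List.pyGet? fibo (-2)).getD 0])
  else fibo
termination_by 300 - fibo.length
decreasing_by simp [List.length_append]; omega

def eh_fibonacci (a : Int) : String :=
  let fibo := ehFibLoopA [0, 1]
  if fibo.contains a then "O número pertence à sequência Fibonacci."
  else "O número não pertence à sequência Fibonacci."

-- ===== PORT B =====
-- def fib_pair(n): fast doubling, returns (F(n), F(n+1))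
def fibPairB (n : Nat) : Int × Int :=
  if _h : n = 0 then (0, 1)
  else
    let pq := fibPairB (n / 2)
    let p := pq.1
    let q := pq.2
    let c := p * (2 * q - p)
    let d := p * p + q * q
    if n % 2 = 1 then (d, c + d) else (c, d)
termination_by n
decreasing_by exact Nat.div_lt_self (Nat.pos_of_ne_zero _h) (by omega)

-- while lo < hi: mid = (lo+hi)//2; if fib_pair(mid)[0] < a: lo = mid+1 else hi = mid
def bsearchB (a : Int) (lo hi : Nat) : Nat :=
  if lo < hi then
    let mid := (lo + hi) / 2
    if (fibPairB mid).1 < a then bsearchB a (mid + 1) hi else bsearchB a lo mid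
  else lo
termination_by hi - lo
decreasing_by all_goals omega

def eh_fibonacci_alt (a : Int) : String :=
  let lo := bsearchB a 0 299
  if (fibPairB lo).1 == a then "O número pertence à sequência Fibonacci."
  else "O número não pertence à sequência Fibonacci."

-- ===== PRECONDITION & SPEC =====
def Spec_eh_fibonacci (a : Int) (out : String) : Prop := out = eh_fibonacci_alt a
instance (a : Int) (out : String) : Decidable (Spec_eh_fibonacci a out) := by unfold Spec_eh_fibonacci; infer_instance

-- ===== CLAIM (what is proved, stated in full; the proofs are below) =====
def Claim_equal_eh_fibonacci : Prop := ∀ (a : Int), Dom_eh_fibonacci a → Spec_eh_fibonacci a (eh_fibonacci a)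

-- ===== LEMMAS AND PROOFS =====

-- the terms A's loop appends after the seed [p, q]
def ehFibTail : Nat → Int → Int → List Int
  | 0, _, _ => []
  | n + 1, p, q => (q + p) :: ehFibTail n q (q + p)

lemma ehFibLoopA_eq (n : Nat) (l : List Int) (p q : Int)
    (hn : 300 - (l.length + 2) = n) :
    ehFibLoopA (l ++ [p, q]) = l ++ [p, q] ++ ehFibTail n p q := by
  induction n generalizing l p q with
  | zero =>
      rw [ehFibLoopA]
      have h : ¬ (l ++ [p, q]).length < 300 := by simp [List.length_append]; omega
      rw [if_neg h]
      simp [ehFibTail]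
  | succ n ih =>
      rw [ehFibLoopA]
      have hlt : (l ++ [p, q]).length < 300 := by simp [List.length_append]; omega
      have h1 : PySem.List.pyGet? (l ++ [p, q]) (-1) = some q := by
        rw [show l ++ [p, q] = (l ++ [p]) ++ [q] from by simp]
        exact PySem.List.pyGet?_neg_one_append_singleton _ _
      have h2 : PySem.List.pyGet? (l ++ [p, q]) (-2) = some p := by
        rw [PySem.List.pyGet?_neg_ofNat (l ++ [p, q]) 2 (by omega) (by simp)]
        rw [show (l ++ [p, q]).length - 2 = l.length from by simp]
        simp
      rw [if_pos hlt, h1, h2]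
      simp only [Option.getD_some]
      have key := ih (l ++ [p]) q (q + p) (by simp [List.length_append] at hn ⊢; omega)
      rw [show l ++ [p, q] ++ [q + p] = (l ++ [p]) ++ [q, q + p] from by simp, key]
      simp [ehFibTail]

-- the Fibonacci numbers as integers
def fibZ (k : Nat) : Int := (Nat.fib k : Int)

lemma ehFibTail_eq_map (n k : Nat) :
    ehFibTail n (fibZ k) (fibZ (k + 1)) = (List.range n).map (fun i => fibZ (k + 2 + i)) := by
  induction n generalizing k with
  | zero => simp [ehFibTail]
  | succ n ih =>
      have hadd : fibZ (k + 1) + fibZ k = fibZ (k + 2) := by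
        simp only [fibZ, Nat.fib_add_two]
        push_cast
        ring
      show (fibZ (k + 1) + fibZ k) :: ehFibTail n (fibZ (k + 1)) (fibZ (k + 1) + fibZ k)
            = _
      rw [hadd, ih (k + 1)]
      rw [List.range_succ_eq_map]
      simp only [List.map_cons, List.map_map]
      have hf : (fun i => fibZ (k + 1 + 2 + i)) = (fun i => fibZ (k + 2 + i)) ∘ Nat.succ := by
        funext i
        simp only [Function.comp_apply]
        congr 1
        omega
      rw [hf]

lemma seed_map_range (n : Nat) :
    [fibZ 0, fibZ 1] ++ (List.range n).map (fun i => fibZ (0 + 2 + i))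
      = (List.range (n + 2)).map fibZ := by
  induction n with
  | zero => simp [List.range_succ]
  | succ n ih =>
      calc [fibZ 0, fibZ 1] ++ (List.range (n + 1)).map (fun i => fibZ (0 + 2 + i))
          = ([fibZ 0, fibZ 1] ++ (List.range n).map (fun i => fibZ (0 + 2 + i)))
              ++ [fibZ (0 + 2 + n)] := by
            rw [List.range_succ, List.map_append, ← List.append_assoc]
            simp
        _ = (List.range (n + 2)).map fibZ ++ [fibZ (n + 2)] := by
            rw [ih, show 0 + 2 + n = n + 2 from by omega]
        _ = (List.range (n + 1 + 2)).map fibZ := by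
            conv_rhs => rw [show n + 1 + 2 = (n + 2) + 1 from rfl, List.range_succ,
              List.map_append]
            simp

lemma ehFibLoopA_closed :
    ehFibLoopA [0, 1] = (List.range 300).map fibZ := by
  have h := ehFibLoopA_eq 298 [] (fibZ 0) (fibZ 1) (by simp)
  simp only [List.nil_append] at h
  rw [show ([0, 1] : List Int) = [fibZ 0, fibZ 1] from by simp [fibZ], h,
      ehFibTail_eq_map 298 0, seed_map_range 298]

-- membership in A's list ↔ some index below 300 hits a
lemma containsA_iff (a : Int) :
    ((List.range 300).map fibZ).contains a = true ↔ ∃ k, k < 300 ∧ fibZ k = a := by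
  simp only [List.contains_eq_mem, decide_eq_true_eq, List.mem_map, List.mem_range]

-- fast doubling computes Fibonacci
lemma fibPairB_eq (n : Nat) : fibPairB n = (fibZ n, fibZ (n + 1)) := by
  induction n using Nat.strong_induction_on with
  | _ n ih =>
    rw [fibPairB]
    by_cases h0 : n = 0
    · subst h0; simp [fibZ]
    · simp only [dif_neg h0]
      have hrec := ih (n / 2) (Nat.div_lt_self (Nat.pos_of_ne_zero h0) (by omega))
      rw [hrec]
      set m := n / 2 with hm
      have hle : Nat.fib m ≤ Nat.fib (m + 1) := Nat.fib_le_fib_succ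
      have hc : fibZ m * (2 * fibZ (m + 1) - fibZ m) = (Nat.fib (2 * m) : Int) := by
        rw [Nat.fib_two_mul]
        push_cast [Nat.cast_sub (by omega : Nat.fib m ≤ 2 * Nat.fib (m + 1))]
        simp only [fibZ]
      have hd : fibZ m * fibZ m + fibZ (m + 1) * fibZ (m + 1) = (Nat.fib (2 * m + 1) : Int) := by
        rw [Nat.fib_two_mul_add_one]
        push_cast
        simp only [fibZ]
        ring
      by_cases hpar : n % 2 = 1
      · simp only [if_pos hpar, Prod.mk.injEq]
        have hn : n = 2 * m + 1 := by omega
        constructor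
        · rw [hd, hn]; rfl
        · rw [hc, hd]
          have hfe : fibZ (n + 1) = (Nat.fib (2 * m) : Int) + (Nat.fib (2 * m + 1) : Int) := by
            rw [hn, show 2 * m + 1 + 1 = 2 * m + 2 from rfl]
            show ((Nat.fib (2 * m + 2) : Nat) : Int) = _
            rw [Nat.fib_add_two]
            push_cast; ring
          rw [hfe]
      · simp only [if_neg hpar, Prod.mk.injEq]
        have hn : n = 2 * m := by omega
        constructor
        · rw [hc, hn]; rfl
        · rw [hd, hn]; rfl

lemma fibZ_mono : Monotone fibZ := fun _ _ h => by
  simpa [fibZ] using Int.ofNat_le.mpr (Nat.fib_mono h)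

-- binary-search invariant: result r satisfies lo ≤ r ≤ hi, everything below r is < a,
-- and either r = 299 or a ≤ fibZ r
lemma bsearchB_spec (a : Int) (lo hi : Nat) (hlh : lo ≤ hi) (hhi : hi ≤ 299)
    (hbelow : ∀ k, k < lo → fibZ k < a) (habove : hi = 299 ∨ a ≤ fibZ hi) :
    lo ≤ bsearchB a lo hi ∧ bsearchB a lo hi ≤ hi ∧
    (∀ k, k < bsearchB a lo hi → fibZ k < a) ∧
    (bsearchB a lo hi = 299 ∨ a ≤ fibZ (bsearchB a lo hi)) := by
  induction hn : hi - lo using Nat.strong_induction_on generalizing lo hi with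
  | _ n ih =>
    rw [bsearchB]
    by_cases hlt : lo < hi
    · simp only [if_pos hlt]
      have hmid1 : lo ≤ (lo + hi) / 2 := by omega
      have hmid2 : (lo + hi) / 2 < hi := by omega
      rw [fibPairB_eq]
      by_cases hcmp : fibZ ((lo + hi) / 2) < a
      · simp only [if_pos hcmp]
        have := ih (hi - ((lo + hi) / 2 + 1)) (by omega) ((lo + hi) / 2 + 1) hi
          (by omega) hhi
          (fun k hk => by
            by_cases hk' : k < lo
            · exact hbelow k hk'
            · exact lt_of_le_of_lt (fibZ_mono (by omega : k ≤ (lo + hi) / 2)) hcmp)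
          habove rfl
        exact ⟨by omega, this.2.1, this.2.2.1, this.2.2.2⟩
      · simp only [if_neg hcmp]
        have := ih (((lo + hi) / 2) - lo) (by omega) lo ((lo + hi) / 2)
          hmid1 (by omega) hbelow (Or.inr (not_lt.mp hcmp)) rfl
        exact ⟨this.1, by omega, this.2.2.1, this.2.2.2⟩
    · simp only [if_neg hlt]
      have : lo = hi := by omega
      subst this
      exact ⟨le_refl _, le_refl _, hbelow, habove⟩

-- B answers "yes" exactly when some index below 300 hits a
lemma altB_iff (a : Int) :
    ((fibPairB (bsearchB a 0 299)).1 == a) = true ↔ ∃ k, k < 300 ∧ fibZ k = a := by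
  obtain ⟨_, hle, hbelow, hor⟩ :=
    bsearchB_spec a 0 299 (by omega) (le_refl _) (by omega) (Or.inl rfl)
  set r := bsearchB a 0 299 with hr
  rw [fibPairB_eq]
  simp only [beq_iff_eq]
  constructor
  · intro h; exact ⟨r, by omega, h⟩
  · rintro ⟨k, hk, rfl⟩
    have hrk : r ≤ k := by
      by_contra h
      exact lt_irrefl _ (hbelow k (by omega))
    rcases hor with h299 | hge
    · have : k = r := by omega
      rw [this]
    · exact le_antisymm (fibZ_mono hrk) hge

-- ===== VERDICT (by name: the statement is the Claim_ definition above) =====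
theorem eh_fibonacci_spec : Claim_equal_eh_fibonacci := by
  intro a _
  unfold Spec_eh_fibonacci eh_fibonacci eh_fibonacci_alt
  simp only [ehFibLoopA_closed]
  by_cases h : ∃ k, k < 300 ∧ fibZ k = a
  · rw [if_pos ((containsA_iff a).mpr h), if_pos ((altB_iff a).mpr h)]
  · rw [if_neg (fun hc => h ((containsA_iff a).mp hc)),
        if_neg (fun hc => h ((altB_iff a).mp hc))]
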